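-- pv_equiv track=rewrite | github.com/fqKm/Codewars-kyu8 | Untitled-1.py | get_evil
-- ===== SOURCE A (Python) =====
-- def get_evil(n):
--     evil_count = 0
--     num = 0
--     while True:
--         binary = bin(num)[2:]
--         ones_counter = binary.count('1')
--         if ones_counter % 2 == 0:
--             evil_count += 1
--         if ones_counter == n:
--             return num
--         num += 1
-- ===== SOURCE B (Python) =====
-- def get_evil(n):
--     # first number with exactly n one-bits: n consecutive low ones
--     return (1 << n) - 1
-- ===== Notes on version B (the rewrite author's own statement) =====
-- stated objective: simpler
-- what changed: Replaced the scan over successive integers (testing each one's popcount) by the closed form (1<<n)-1, the smallest number with exactly n one-bits; intended as asymptotically faster (A is O(2^n)), but a timing run could not measure a ratio because A already times out at n=16.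
import Mathlib
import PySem

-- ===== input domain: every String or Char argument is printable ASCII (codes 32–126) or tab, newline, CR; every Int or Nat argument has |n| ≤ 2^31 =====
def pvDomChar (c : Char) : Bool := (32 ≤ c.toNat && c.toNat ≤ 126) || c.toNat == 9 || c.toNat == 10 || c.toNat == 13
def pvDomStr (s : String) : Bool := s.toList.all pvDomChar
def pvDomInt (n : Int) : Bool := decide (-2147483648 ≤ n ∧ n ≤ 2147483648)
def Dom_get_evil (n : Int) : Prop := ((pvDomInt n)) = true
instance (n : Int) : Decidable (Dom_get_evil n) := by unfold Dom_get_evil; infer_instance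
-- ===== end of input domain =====

-- B replaces A's scan over successive integers with the closed form (1<<n)-1 (the smallest
-- number with exactly n one-bits); intended as faster, though a timing run could not
-- measure a ratio (A times out already at n=16).


-- ===== PORT A =====
-- bin(num)[2:].count('1'): number of 1-digits in the binary expansion
def pvOnes (m : Nat) : Nat :=
  if m = 0 then 0 else m % 2 + pvOnes (m / 2)
decreasing_by exact Nat.div_lt_self (Nat.pos_of_ne_zero (by assumption)) (by omega)

-- the `while True` loop of A, carrying its two mutable variables (evil_count, num);
-- fuel 2^n.toNat only makes the loop total (it is never exhausted when 0 ≤ n)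
def pvLoopA (n : Int) (fuel : Nat) (evil_count num : Nat) : Int :=
  match fuel with
  | 0 => (num : Int)
  | f + 1 =>
    let ones_counter := pvOnes num
    let evil_count' := if ones_counter % 2 = 0 then evil_count + 1 else evil_count
    if (ones_counter : Int) = n then (num : Int)
    else pvLoopA n f evil_count' (num + 1)

def get_evil (n : Int) : Int := pvLoopA n (2 ^ n.toNat) 0 0

-- ===== PORT B =====
def get_evil_alt (n : Int) : Int := 2 ^ n.toNat - 1   -- (1 << n) - 1

-- ===== PRECONDITION & SPEC =====
-- Pre_ excludes n < 0, where Python A loops forever (never returns).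
def Pre_get_evil (n : Int) : Prop := 0 ≤ n
instance (n : Int) : Decidable (Pre_get_evil n) := by unfold Pre_get_evil; infer_instance
def pvWitness_get_evil : Int := (3)

def Spec_get_evil (n : Int) (out : Int) : Prop := out = get_evil_alt n
instance (n : Int) (out : Int) : Decidable (Spec_get_evil n out) := by unfold Spec_get_evil; infer_instance

-- ===== CLAIM (what is proved, stated in full; the proofs are below) =====
def Claim_equal_get_evil : Prop := ∀ (n : Int), Dom_get_evil n → Pre_get_evil n → Spec_get_evil n (get_evil n)

-- ===== LEMMAS AND PROOFS =====

theorem pvOnes_ge (m : Nat) : 2 ^ pvOnes m - 1 ≤ m := by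
  induction m using Nat.strong_induction_on with
  | _ m ih =>
    rw [pvOnes]
    by_cases h : m = 0
    · simp [h]
    · simp only [if_neg h]
      have hd := ih (m / 2) (Nat.div_lt_self (Nat.pos_of_ne_zero h) (by omega))
      have h2 : 2 * (m / 2) + m % 2 = m := by omega
      have hpow : (1 : Nat) ≤ 2 ^ pvOnes (m / 2) := Nat.one_le_two_pow
      rcases Nat.mod_two_eq_zero_or_one m with hm | hm <;>
        simp only [hm] <;> rw [pow_add] <;> omega

theorem pvOnes_pred_pow (k : Nat) : pvOnes (2 ^ k - 1) = k := by
  induction k with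
  | zero => simp [pvOnes]
  | succ k ih =>
    have h1 : 2 ^ (k + 1) - 1 = 2 * (2 ^ k - 1) + 1 := by
      have : (1:Nat) ≤ 2 ^ k := Nat.one_le_two_pow
      rw [pow_succ]; omega
    rw [h1, pvOnes]
    have h2 : 2 * (2 ^ k - 1) + 1 ≠ 0 := by omega
    simp only [if_neg h2]
    have h3 : (2 * (2 ^ k - 1) + 1) % 2 = 1 := by omega
    have h4 : (2 * (2 ^ k - 1) + 1) / 2 = 2 ^ k - 1 := by omega
    rw [h3, h4, ih]; omega

theorem pvLoopA_eq (k : Nat) : ∀ (fuel num evil : Nat),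
    num ≤ 2 ^ k - 1 → 2 ^ k - num ≤ fuel →
    pvLoopA (k : Int) fuel evil num = ((2 ^ k - 1 : Nat) : Int) := by
  intro fuel
  induction fuel with
  | zero =>
    intro num evil h1 h2
    have : (1:Nat) ≤ 2 ^ k := Nat.one_le_two_pow
    omega
  | succ f ih =>
    intro num evil h1 h2
    rw [pvLoopA]
    by_cases h : ((pvOnes num : Nat) : Int) = (k : Int)
    · have hk : pvOnes num = k := by exact_mod_cast h
      have := pvOnes_ge num
      rw [hk] at this
      have hnum : num = 2 ^ k - 1 := by omega
      rw [if_pos h, hnum]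
    · rw [if_neg h]
      have hk : pvOnes num ≠ k := fun e => h (by exact_mod_cast congrArg (Nat.cast : Nat → Int) e)
      have hne : num ≠ 2 ^ k - 1 := by
        intro e; exact hk (e ▸ pvOnes_pred_pow k)
      exact ih (num + 1) _ (by omega) (by omega)

-- ===== VERDICT (by name: the statement is the Claim_ definition above) =====
theorem get_evil_spec : Claim_equal_get_evil := by
  intro n _ hpre
  unfold Spec_get_evil get_evil get_evil_alt
  set k := n.toNat with hk
  have hn : n = (k : Int) := by simp [hk, Int.toNat_of_nonneg hpre]
  rw [hn]
  have h2 : (0:Nat) ≤ 2 ^ k - 1 := Nat.zero_le _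
  rw [pvLoopA_eq k (2 ^ k) 0 0 h2 (Nat.sub_le _ _), Nat.cast_sub Nat.one_le_two_pow]
  push_cast
  ring
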